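-- pv_equiv track=rewrite | github.com/SieuPepe/v1.04_1812 | script/generar_script_decimales.py | generate_alter_statements
-- ===== SOURCE A (Python) =====
-- def generate_alter_statements(columns):
--     """
--     Genera sentencias ALTER TABLE para convertir columnas a DECIMAL(10,2).
--
--     Args:
--         columns: Lista de tuplas (tabla, columna, tipo_datos, nullable, default, comment)
--
--     Returns:
--         str: Script SQL con todas las sentencias ALTER TABLE
--     """
--     script = """-- ============================================================================
-- -- Script para establecer precisión de 2 decimales en todos los campos numéricos
-- -- Generado automáticamente desde la estructura de la base de datos
-- -- ============================================================================
-- -- Fecha: 2025-11-08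
-- -- Descripción: Convierte todos los campos DOUBLE y FLOAT a DECIMAL(10,2)
-- -- ============================================================================
--
-- """
--
--     # Agrupar por tabla
--     tables = {}
--     for row in columns:
--         table_name = row[0]
--         col_name = row[1]
--         is_nullable = row[3]
--         col_default = row[4]
--         col_comment = row[5] if row[5] else ''
--
--         if table_name not in tables:
--             tables[table_name] = []
--
--         tables[table_name].append({
--             'name': col_name,
--             'nullable': is_nullable,
--             'default': col_default,
--             'comment': col_comment
--         })
--
--     # Generar ALTER TABLE para cada tabla
--     for table_name in sorted(tables.keys()):
--         script += f"\n-- Tabla: {table_name}\n"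
--         script += f"ALTER TABLE `{table_name}`\n"
--
--         modifications = []
--         for col in tables[table_name]:
--             null_clause = "NULL" if col['nullable'] == 'YES' else "NOT NULL"
--             default_clause = f" DEFAULT {col['default']}" if col['default'] else " DEFAULT NULL" if col['nullable'] == 'YES' else ""
--             comment_clause = f" COMMENT '{col['comment']}'" if col['comment'] else ""
--
--             modifications.append(
--                 f"    MODIFY COLUMN `{col['name']}` DECIMAL(10,2) {null_clause}{default_clause}{comment_clause}"
--             )
--
--         script += ",\n".join(modifications)
--         script += ";\n"
--
--     script += """
-- -- ============================================================================
-- -- Fin del script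
-- -- ============================================================================
-- SELECT 'Script de corrección de precisión decimal completado' AS status;
-- SELECT 'Todos los campos numéricos ahora usan DECIMAL(10,2) para garantizar 2 decimales' AS info;
-- """
--
--     return script
-- ===== SOURCE B (Python) =====
-- HEADER = """-- ============================================================================
-- -- Script para establecer precisión de 2 decimales en todos los campos numéricos
-- -- Generado automáticamente desde la estructura de la base de datos
-- -- ============================================================================
-- -- Fecha: 2025-11-08
-- -- Descripción: Convierte todos los campos DOUBLE y FLOAT a DECIMAL(10,2)
-- -- ============================================================================
--
-- """
--
-- FOOTER = """
-- -- ============================================================================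
-- -- Fin del script
-- -- ============================================================================
-- SELECT 'Script de corrección de precisión decimal completado' AS status;
-- SELECT 'Todos los campos numéricos ahora usan DECIMAL(10,2) para garantizar 2 decimales' AS info;
-- """
--
--
-- def _column_line(row):
--     _table, name, _dtype, nullable, default, comment = row
--     line = "    MODIFY COLUMN `" + name + "` DECIMAL(10,2) "
--     line += "NULL" if nullable == "YES" else "NOT NULL"
--     if default:
--         line += " DEFAULT " + default
--     elif nullable == "YES":
--         line += " DEFAULT NULL"
--     if comment:
--         line += " COMMENT '" + comment + "'"
--     return line
--
--
-- def _table_block(table, columns):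
--     lines = [_column_line(r) for r in columns if r[0] == table]
--     return (f"\n-- Tabla: {table}\nALTER TABLE `{table}`\n"
--             + ",\n".join(lines) + ";\n")
--
--
-- def generate_alter_statements(columns):
--     tables = sorted({row[0] for row in columns})
--     return HEADER + "".join(_table_block(t, columns) for t in tables) + FOOTER
-- ===== Notes on version B (the rewrite author's own statement) =====
-- stated objective: simpler
-- what changed: B drops A's intermediate dict of per-column record dicts entirely: it sorts the distinct table names once and emits each table's block by filtering the input list for that table, building each MODIFY line directly from the row tuple.
import Mathlib
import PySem

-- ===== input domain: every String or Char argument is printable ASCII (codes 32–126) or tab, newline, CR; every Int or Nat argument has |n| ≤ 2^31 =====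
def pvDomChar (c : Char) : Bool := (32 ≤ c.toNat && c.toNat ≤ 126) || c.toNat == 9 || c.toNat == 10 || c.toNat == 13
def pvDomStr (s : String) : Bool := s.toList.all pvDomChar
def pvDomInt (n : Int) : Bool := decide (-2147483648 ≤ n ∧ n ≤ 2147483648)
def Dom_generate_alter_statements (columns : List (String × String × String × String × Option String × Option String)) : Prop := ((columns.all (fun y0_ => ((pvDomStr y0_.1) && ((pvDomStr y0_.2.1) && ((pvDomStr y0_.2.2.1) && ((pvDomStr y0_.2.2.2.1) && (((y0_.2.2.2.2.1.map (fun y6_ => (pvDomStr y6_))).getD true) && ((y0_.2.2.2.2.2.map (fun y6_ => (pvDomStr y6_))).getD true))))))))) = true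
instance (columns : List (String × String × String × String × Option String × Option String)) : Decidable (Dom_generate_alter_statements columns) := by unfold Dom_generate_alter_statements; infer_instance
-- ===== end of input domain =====

-- B replaces A's one-pass dict grouping by sorting the distinct table names and filtering the
-- input list once per table (objective: simpler — no intermediate dict/records, shorter code).

def pvHeader : String := "-- ============================================================================\n-- Script para establecer precisión de 2 decimales en todos los campos numéricos\n-- Generado automáticamente desde la estructura de la base de datos\n-- ============================================================================\n-- Fecha: 2025-11-08\n-- Descripción: Convierte todos los campos DOUBLE y FLOAT a DECIMAL(10,2)\n-- ============================================================================\n\n"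

def pvFooter : String := "\n-- ============================================================================\n-- Fin del script\n-- ============================================================================\nSELECT 'Script de corrección de precisión decimal completado' AS status;\nSELECT 'Todos los campos numéricos ahora usan DECIMAL(10,2) para garantizar 2 decimales' AS info;\n"

-- ===== PORT A =====
-- A's per-column record {'name','nullable','default','comment'} as a tuple in that order
def pvModLineA (col : String × String × Option String × String) : String :=
  let null_clause := if col.2.1 = "YES" then "NULL" else "NOT NULL"
  let default_clause :=
    match col.2.2.1 with
    | some s => if s ≠ "" then " DEFAULT " ++ s
        else if col.2.1 = "YES" then " DEFAULT NULL" else ""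
    | none => if col.2.1 = "YES" then " DEFAULT NULL" else ""
  let comment_clause := if col.2.2.2 ≠ "" then " COMMENT '" ++ col.2.2.2 ++ "'" else ""
  "    MODIFY COLUMN `" ++ col.1 ++ "` DECIMAL(10,2) " ++ null_clause ++ default_clause ++ comment_clause

def generate_alter_statements (columns : List (String × String × String × String × Option String × Option String)) : String :=
  let script := pvHeader
  -- 'tables = {}; for row in columns: …' — group rows by table name, insertion order
  let tables : PySem.Dict String (List (String × String × Option String × String)) :=
    columns.foldl (fun tables row =>
      let table_name := row.1
      let col_name := row.2.1
      let is_nullable := row.2.2.2.1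
      let col_default := row.2.2.2.2.1
      -- col_comment = row[5] if row[5] else ''
      let col_comment : String := match row.2.2.2.2.2 with
        | some s => if s ≠ "" then s else ""
        | none => ""
      let tables := if tables.contains table_name then tables else tables.insert table_name []
      tables.modify table_name [] (· ++ [(col_name, is_nullable, col_default, col_comment)]))
      PySem.Dict.empty
  -- 'for table_name in sorted(tables.keys()): …'
  let script := (PySem.List.sorted tables.keys (fun x => x) false).foldl (fun script table_name =>
    let script := script ++ "\n-- Tabla: " ++ table_name ++ "\n"
    let script := script ++ "ALTER TABLE `" ++ table_name ++ "`\n"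
    let modifications := (tables.getD table_name []).foldl
      (fun mods col => mods ++ [pvModLineA col]) ([] : List String)
    let script := script ++ PySem.Str.join ",\n" modifications
    script ++ ";\n") script
  script ++ pvFooter

-- ===== PORT B =====
def pvColumnLine (row : String × String × String × String × Option String × Option String) : String :=
  let line := "    MODIFY COLUMN `" ++ row.2.1 ++ "` DECIMAL(10,2) "
  let line := line ++ (if row.2.2.2.1 = "YES" then "NULL" else "NOT NULL")
  let line := match row.2.2.2.2.1 with
    | some s => if s ≠ "" then line ++ (" DEFAULT " ++ s)
        else if row.2.2.2.1 = "YES" then line ++ " DEFAULT NULL" else line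
    | none => if row.2.2.2.1 = "YES" then line ++ " DEFAULT NULL" else line
  match row.2.2.2.2.2 with
  | some s => if s ≠ "" then line ++ (" COMMENT '" ++ s ++ "'") else line
  | none => line

def pvTableBlock (table : String) (columns : List (String × String × String × String × Option String × Option String)) : String :=
  let lines := (columns.filter (fun r => r.1 == table)).map pvColumnLine
  "\n-- Tabla: " ++ table ++ "\nALTER TABLE `" ++ table ++ "`\n" ++ PySem.Str.join ",\n" lines ++ ";\n"

def generate_alter_statements_alt (columns : List (String × String × String × String × Option String × Option String)) : String :=
  let tables := PySem.List.sorted (PySem.Set.ofList (columns.map (fun r => r.1))) (fun x => x) false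
  pvHeader ++ PySem.Str.join "" (tables.map (fun t => pvTableBlock t columns)) ++ pvFooter

-- ===== PRECONDITION & SPEC =====
def Spec_generate_alter_statements (columns : List (String × String × String × String × Option String × Option String)) (out : String) : Prop := out = generate_alter_statements_alt columns
instance (columns : List (String × String × String × String × Option String × Option String)) (out : String) : Decidable (Spec_generate_alter_statements columns out) := by unfold Spec_generate_alter_statements; infer_instance

-- ===== CLAIM (what is proved, stated in full; the proofs are below) =====
def Claim_equal_generate_alter_statements : Prop := ∀ (columns : List (String × String × String × String × Option String × Option String)), Dom_generate_alter_statements columns → Spec_generate_alter_statements columns (generate_alter_statements columns)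

-- ===== LEMMAS AND PROOFS =====

-- the row → record conversion A's grouping loop performs
def pvConv (row : String × String × String × String × Option String × Option String) :
    String × String × Option String × String :=
  (row.2.1, row.2.2.2.1, row.2.2.2.2.1,
    match row.2.2.2.2.2 with
    | some s => if s ≠ "" then s else ""
    | none => "")

theorem pv_if_contains_modify {ν : Type} (d : PySem.Dict String ν) (k : String) (v0 : ν) (f : ν → ν) :
    (if d.contains k then d else d.insert k v0).modify k v0 f = d.modify k v0 f := by
  by_cases h : d.contains k
  · simp [h]
  · have hn : d.get? k = none := by
      rw [PySem.Dict.get?_eq_none_iff_contains]; simp [h]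
    simp [h, PySem.Dict.modify, PySem.Dict.insert_insert_self, PySem.Dict.getD,
      PySem.Dict.get?_insert_self, hn]

theorem pv_join_empty_cons (a : String) (l : List String) :
    PySem.Str.join "" (a :: l) = a ++ PySem.Str.join "" l := by
  apply String.toList_inj.mp
  cases l with
  | nil => simp [PySem.Chars.join_singleton, PySem.Chars.join_nil]
  | cons b t => simp [PySem.Chars.join_cons_cons]

-- A's table dict as a fold of modify steps
theorem pv_tablesA_eq (columns : List (String × String × String × String × Option String × Option String)) :
    List.foldl (fun (tables : PySem.Dict String (List (String × String × Option String × String))) row =>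
        (if tables.contains row.1 then tables else tables.insert row.1 []).modify row.1 []
          (fun x => x ++ [(row.2.1, row.2.2.2.1, row.2.2.2.2.1,
            match row.2.2.2.2.2 with
            | some s => if s ≠ "" then s else ""
            | none => "")])) PySem.Dict.empty columns =
      List.foldl (fun tables row => tables.modify row.1 [] (· ++ [pvConv row])) PySem.Dict.empty columns := by
  apply PySem.List.foldl_congr_mem
  intro acc x _
  exact pv_if_contains_modify acc x.1 [] _

theorem pv_tablesA_getD (columns : List (String × String × String × String × Option String × Option String)) (t : String) :
    (columns.foldl (fun tables row => tables.modify row.1 [] (· ++ [pvConv row])) PySem.Dict.empty).getD t []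
      = (columns.filter (fun r => r.1 == t)).map pvConv := by
  have h := PySem.Dict.getD_foldl_modify_append
    (columns.map (fun r => (r.1, pvConv r))) (PySem.Dict.empty (κ := String)) t
  rw [List.foldl_map] at h
  simpa [List.filter_map, Function.comp] using h

theorem pv_tablesA_keys (columns : List (String × String × String × String × Option String × Option String)) :
    (columns.foldl (fun tables row => tables.modify row.1 [] (· ++ [pvConv row])) PySem.Dict.empty).keys
      = PySem.Set.ofList (columns.map (fun r => r.1)) := by
  have h := PySem.Dict.keys_foldl_modify_key columns (fun r => r.1) []
    (fun _ r => (· ++ [pvConv r])) PySem.Dict.empty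
  rw [h, PySem.Set.ofList_eq_foldl]
  rfl

-- line builders agree
theorem pv_line_eq (r : String × String × String × String × Option String × Option String) :
    pvModLineA (pvConv r) = pvColumnLine r := by
  obtain ⟨t, c, d, n, df, cm⟩ := r
  simp only [pvModLineA, pvConv, pvColumnLine]
  cases df <;> cases cm <;>
    (split_ifs <;> (apply String.toList_inj.mp; simp_all; try rfl) <;>
      (split_ifs <;> simp_all <;> try rfl))

theorem pv_line_comp : pvModLineA ∘ pvConv = pvColumnLine := funext pv_line_eq

-- the script-accumulating loop is a join of per-table blocks
theorem pv_foldl_append_join (g : String → String) (ks : List String) (s : String) :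
    ks.foldl (fun sc t => sc ++ g t) s = s ++ PySem.Str.join "" (ks.map g) := by
  induction ks generalizing s with
  | nil => simp [PySem.Str.join, PySem.Chars.join_nil]
  | cons k ks ih =>
    simp only [List.foldl_cons, List.map_cons, pv_join_empty_cons]
    rw [ih, String.append_assoc]

-- ===== VERDICT (by name: the statement is the Claim_ definition above) =====
theorem generate_alter_statements_spec : Claim_equal_generate_alter_statements := by
  intro columns _
  unfold Spec_generate_alter_statements generate_alter_statements generate_alter_statements_alt
  simp only [pv_tablesA_eq, pv_tablesA_getD, pv_tablesA_keys,
    PySem.List.foldl_append_singleton_eq_map, List.nil_append, List.map_map, pv_line_comp]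
  have h := PySem.List.foldl_congr_mem (init := pvHeader)
    (l := PySem.List.sorted (PySem.Set.ofList (columns.map (fun r => r.1))) (fun x => x) false)
    (f := fun script t => script ++ "\n-- Tabla: " ++ t ++ "\n" ++ "ALTER TABLE `" ++ t ++ "`\n" ++
        PySem.Str.join ",\n" (List.map pvColumnLine (List.filter (fun r => r.1 == t) columns)) ++ ";\n")
    (g := fun sc t => sc ++ pvTableBlock t columns) ?_
  · rw [h, pv_foldl_append_join]
  · intro acc t _
    apply String.toList_inj.mp
    simp [pvTableBlock, String.append_assoc]
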